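-- pv_equiv track=rewrite | github.com/kimikhyeon1/Algorithm | 프로그래머스/0/120863. 다항식 더하기/다항식 더하기.py | solution
-- ===== SOURCE A (Python) =====
-- def solution(polynomial):
--     number = 0
--     x = 0
--     stack = list(polynomial)
--     number_space = ""
--     is_x = False
--     while stack:
--         temp = stack.pop()
--
--         if temp == " ":
--             if is_x:
--                 if number_space:
--                     x += int(number_space[::-1])
--                 else:
--                     x += 1
--                 is_x = False
--             else:
--                 if number_space:
--                     number += int(number_space[::-1])
--             number_space = ""
--
--         if temp == "x":
--             is_x = True
--
--         if 45 < ord(temp) < 65: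
--             number_space += temp
--
--     if is_x:
--         if number_space:
--             x += int(number_space[::-1])
--         else:
--             x += 1
--     elif number_space:
--         number += int(number_space[::-1])
--
--     answer = ""
--
--     if x == 1:
--         answer += "x"
--     elif x > 1:
--         answer += str(x)+"x"
--
--     if number > 0:
--         if x:
--             answer += " + " + str(number)
--         else:
--             answer += str(number)
--
--     return answer
-- ===== SOURCE B (Python) =====
-- def solution(polynomial):
--     x = 0
--     number = 0
--     for token in polynomial.split(" "):
--         digits = "".join(ch for ch in token if ch.isdigit())
--         if "x" in token:
--             x += int(digits) if digits else 1
--         elif digits: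
--             number += int(digits)
--     answer = ""
--     if x == 1:
--         answer += "x"
--     elif x > 1:
--         answer += str(x) + "x"
--     if number > 0:
--         if x:
--             answer += " + " + str(number)
--         else:
--             answer += str(number)
--     return answer
-- ===== Notes on version B (the rewrite author's own statement) =====
-- stated objective: simpler
-- what changed: A parses by popping single characters off a reversed stack, accumulating collected characters in reverse and flushing automaton state on every space; B iterates forward over polynomial.split(" "), takes each token's digit characters and adds them to the x- or constant accumulator directly, with no stack, no reversal and no mutable flush state.
import Mathlib
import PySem

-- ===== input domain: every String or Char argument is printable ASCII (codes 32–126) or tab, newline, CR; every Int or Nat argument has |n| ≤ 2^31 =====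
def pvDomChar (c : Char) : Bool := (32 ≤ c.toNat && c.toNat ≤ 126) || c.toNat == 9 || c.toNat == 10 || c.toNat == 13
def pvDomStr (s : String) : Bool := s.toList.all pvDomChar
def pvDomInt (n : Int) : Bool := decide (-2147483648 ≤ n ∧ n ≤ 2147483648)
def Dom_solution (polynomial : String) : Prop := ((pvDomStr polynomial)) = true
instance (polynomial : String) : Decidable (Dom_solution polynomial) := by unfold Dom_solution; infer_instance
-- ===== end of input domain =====

-- B replaces A's backward character-stack automaton by a forward split(" + ")-and-interpret pass (objective: simpler).

-- ===== PORT A =====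
-- State of A's while loop: (number, x, number_space as List Char, is_x).
-- int(s) is ported as (PySem.Int.ofChars? s).getD 0; Pre_solution guarantees the parsed
-- string is a nonempty digit string, so the none (ValueError) case is excluded by Pre_.
def solAStep (st : Int × Int × List Char × Bool) (temp : Char) : Int × Int × List Char × Bool :=
  let (number, x, ns, isx) := st
  -- if temp == " ": flush
  let (number, x, ns, isx) :=
    if temp = ' ' then
      if isx then
        (number, x + (if ns ≠ [] then (PySem.Int.ofChars? ns.reverse).getD 0 else 1), ([] : List Char), false)
      else
        (number + (if ns ≠ [] then (PySem.Int.ofChars? ns.reverse).getD 0 else 0), x, ([] : List Char), isx)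
    else (number, x, ns, isx)
  -- if temp == "x"
  let isx := if temp = 'x' then true else isx
  -- if 45 < ord(temp) < 65  (Char.toNat is exactly ord on the ASCII domain)
  let ns := if 45 < temp.toNat ∧ temp.toNat < 65 then ns ++ [temp] else ns
  (number, x, ns, isx)

-- A's shared rendering tail (the answer-building if-chain, verbatim).
def solRender (x number : Int) : String :=
  let answer : List Char :=
    if x = 1 then ['x']
    else if x > 1 then PySem.Int.toChars x ++ ['x']
    else []
  let answer :=
    if number > 0 then
      if x ≠ 0 then answer ++ ([' ', '+', ' '] ++ PySem.Int.toChars number)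
      else answer ++ PySem.Int.toChars number
    else answer
  String.ofList answer

def solution (polynomial : String) : String :=
  -- 'while stack: temp = stack.pop()' consumes the characters in reverse order
  let st := polynomial.toList.reverse.foldl solAStep (0, 0, ([] : List Char), false)
  let (number, x, ns, isx) := st
  -- the final flush after the loop
  let (number, x) :=
    if isx then
      (number, x + (if ns ≠ [] then (PySem.Int.ofChars? ns.reverse).getD 0 else 1))
    else if ns ≠ [] then (number + (PySem.Int.ofChars? ns.reverse).getD 0, x)
    else (number, x)
  solRender x number

-- ===== PORT B =====
-- per-token interpretation, accumulator (x, number);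
-- ''.join(ch for ch in token if ch.isdigit()) is List.filter (ch.isdigit() on the ASCII
-- domain is exactly '0' ≤ ch ≤ '9'); '"x" in token' for a one-char needle is membership.
def pvIsDig (c : Char) : Bool := 48 ≤ c.toNat && c.toNat ≤ 57

def solBSeg (acc : Int × Int) (seg : List Char) : Int × Int :=
  let (x, number) := acc
  let digits := seg.filter pvIsDig
  if seg.contains 'x' then
    (x + (if digits ≠ [] then (PySem.Int.ofChars? digits).getD 0 else 1), number)
  else if digits ≠ [] then (x, number + (PySem.Int.ofChars? digits).getD 0)
  else (x, number)

def solution_alt (polynomial : String) : String :=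
  -- polynomial.split(" "): the separator is nonempty, so str.split is Chars.splitOn
  let segs := PySem.Chars.splitOn polynomial.toList [' ']
  let (x, number) := segs.foldl solBSeg (0, 0)
  solRender x number

-- ===== PRECONDITION & SPEC =====
-- the characters A collects into number_space: 45 < ord(c) < 65
def pvInRange (c : Char) : Bool := 45 < c.toNat && c.toNat < 65

-- Pre_ excludes exactly the inputs on which A raises ValueError: int() fails iff the
-- string contains a collected-but-non-digit character ('.', '/', ':', ';', '<', '=',
-- '>', '?', '@', codes 46..64 minus the digits). Everywhere A returns, Pre_ holds.
def Pre_solution (polynomial : String) : Prop :=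
  (polynomial.toList.all (fun c => !(pvInRange c) || pvIsDig c)) = true

instance (polynomial : String) : Decidable (Pre_solution polynomial) := by
  unfold Pre_solution; infer_instance

def pvWitness_solution : String := "3x + 7 + x"

def Spec_solution (polynomial : String) (out : String) : Prop := out = solution_alt polynomial
instance (polynomial : String) (out : String) : Decidable (Spec_solution polynomial out) := by unfold Spec_solution; infer_instance

-- ===== CLAIM (what is proved, stated in full; the proofs are below) =====
def Claim_equal_solution : Prop := ∀ (polynomial : String), Dom_solution polynomial → Pre_solution polynomial → Spec_solution polynomial (solution polynomial)

-- ===== LEMMAS AND PROOFS =====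

-- value a token contributes to x / to number (proof-only helpers)
def xval (seg : List Char) : Int :=
  if seg.contains 'x' then
    (if seg.filter pvIsDig ≠ [] then (PySem.Int.ofChars? (seg.filter pvIsDig)).getD 0 else 1)
  else 0
def nval (seg : List Char) : Int :=
  if seg.contains 'x' then 0
  else if seg.filter pvIsDig ≠ [] then (PySem.Int.ofChars? (seg.filter pvIsDig)).getD 0 else 0

-- a token as A's loop sees it: no separator inside, and every collected char is a digit
def GoodSeg (seg : List Char) : Prop :=
  (' ' ∉ seg) ∧ ∀ c ∈ seg.filter pvInRange, pvIsDig c = true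

theorem go_acc (sep : List Char) (fuel : Nat) :
    ∀ (l cur : List Char) (acc : List (List Char)),
      PySem.Chars.splitOn.go sep fuel l cur acc =
        acc.reverse ++ PySem.Chars.splitOn.go sep fuel l cur [] := by
  induction fuel with
  | zero => intro l cur acc; simp [PySem.Chars.splitOn.go]
  | succ f ih =>
    intro l cur acc
    cases l with
    | nil => simp [PySem.Chars.splitOn.go]
    | cons c rest =>
      rw [PySem.Chars.splitOn.go, PySem.Chars.splitOn.go]
      split
      · rw [ih _ _ (cur.reverse :: acc), ih _ _ ([cur.reverse])]
        simp
      · rw [ih _ _ acc]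

theorem go_ne_nil (sep : List Char) (fuel : Nat) :
    ∀ (l cur : List Char) (acc : List (List Char)),
      PySem.Chars.splitOn.go sep fuel l cur acc ≠ [] := by
  induction fuel with
  | zero => intro l cur acc; simp [PySem.Chars.splitOn.go]
  | succ f ih =>
    intro l cur acc
    cases l with
    | nil => simp [PySem.Chars.splitOn.go]
    | cons c rest =>
      rw [PySem.Chars.splitOn.go]
      split
      · exact ih _ _ _
      · exact ih _ _ _

theorem join_go (sep : List Char) (hsep : sep ≠ []) (fuel : Nat) :
    ∀ (l cur : List Char), l.length ≤ fuel →
      PySem.Chars.join sep (PySem.Chars.splitOn.go sep fuel l cur []) = cur.reverse ++ l := by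
  induction fuel with
  | zero =>
    intro l cur h
    have : l = [] := List.eq_nil_of_length_eq_zero (Nat.le_zero.mp h)
    subst this
    simp only [PySem.Chars.splitOn.go, List.append_nil, List.reverse_cons, List.reverse_nil, List.nil_append]
    exact PySem.Chars.join_singleton _ _
  | succ f ih =>
    intro l cur h
    cases l with
    | nil =>
      simp only [PySem.Chars.splitOn.go, List.reverse_cons, List.reverse_nil, List.nil_append, List.append_nil]
      exact PySem.Chars.join_singleton _ _
    | cons c rest =>
      rw [PySem.Chars.splitOn.go]
      split
      · rename_i hpre
        rw [go_acc]
        have hZ := go_ne_nil sep f (List.drop sep.length (c :: rest)) [] []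
        obtain ⟨z, Z, hzz⟩ := List.exists_cons_of_ne_nil hZ
        have hpre' : sep <+: (c :: rest) := by
          exact List.isPrefixOf_iff_prefix.mp hpre
        obtain ⟨tl, htl⟩ := hpre'
        have hlen : (List.drop sep.length (c :: rest)).length ≤ f := by
          have h1 : 1 ≤ sep.length := List.length_pos_iff.mpr hsep
          have : (c :: rest).length ≤ f + 1 := h
          simp only [List.length_drop]
          omega
        have := ih (List.drop sep.length (c :: rest)) [] hlen
        rw [hzz] at this ⊢
        simp only [List.reverse_cons, List.reverse_nil, List.nil_append, List.singleton_append]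
        rw [PySem.Chars.join_cons_cons]
        simp only [List.reverse_nil, List.nil_append] at this
        rw [this]
        have : List.drop sep.length (c :: rest) = tl := by
          rw [← htl]; simp
        rw [this, List.append_assoc, ← htl]
      · rename_i hpre
        have := ih rest (c :: cur) (by simpa using Nat.lt_succ_iff.mp (by simpa using h))
        rw [this]
        simp

theorem join_splitOn (sep : List Char) (hsep : sep ≠ []) (l : List Char) :
    PySem.Chars.join sep (PySem.Chars.splitOn l sep) = l := by
  rw [PySem.Chars.splitOn]
  simpa using join_go sep hsep (l.length + 1) l [] (by omega)

theorem splitOn_ne_nil (sep l : List Char) : PySem.Chars.splitOn l sep ≠ [] := by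
  rw [PySem.Chars.splitOn]; exact go_ne_nil _ _ _ _ _

-- pieces of split(" ") contain no space
theorem go_no_sep (fuel : Nat) :
    ∀ (l cur : List Char) (acc : List (List Char)), l.length ≤ fuel → (' ' ∉ cur) →
      (∀ p ∈ acc, ' ' ∉ p) →
      ∀ p ∈ PySem.Chars.splitOn.go [' '] fuel l cur acc, ' ' ∉ p := by
  induction fuel with
  | zero =>
    intro l cur acc hf hcur hacc p hp
    have : l = [] := List.eq_nil_of_length_eq_zero (Nat.le_zero.mp hf)
    subst this
    simp [PySem.Chars.splitOn.go] at hp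
    rcases hp with hp | hp
    · exact hacc p hp
    · subst hp; simpa using hcur
  | succ f ih =>
    intro l cur acc hf hcur hacc p hp
    cases l with
    | nil =>
      simp [PySem.Chars.splitOn.go] at hp
      rcases hp with hp | hp
      · exact hacc p hp
      · subst hp; simpa using hcur
    | cons c rest =>
      rw [PySem.Chars.splitOn.go] at hp
      split at hp
      · refine ih _ _ _ ?_ (by simp) ?_ p hp
        · simpa using Nat.lt_succ_iff.mp (by simpa using hf)
        · intro q hq
          rcases List.mem_cons.mp hq with hq | hq
          · subst hq; simpa using hcur
          · exact hacc q hq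
      · rename_i hpre
        have hc : c ≠ ' ' := by
          intro he; subst he
          simp [List.isPrefixOf] at hpre
        refine ih _ _ _ ?_ ?_ hacc p hp
        · simpa using Nat.lt_succ_iff.mp (by simpa using hf)
        · intro hm
          rcases List.mem_cons.mp hm with hm | hm
          · exact hc hm.symm
          · exact hcur hm
      
theorem splitOn_no_sep (l : List Char) :
    ∀ p ∈ PySem.Chars.splitOn l [' '], ' ' ∉ p := by
  rw [PySem.Chars.splitOn]
  exact go_no_sep (l.length + 1) l [] [] (by omega) (by simp) (by simp)

-- a character of a piece of the split is a character of the joined string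
theorem mem_join_of_mem (sep : List Char) (parts : List (List Char)) (seg : List Char)
    (hseg : seg ∈ parts) (c : Char) (hc : c ∈ seg) : c ∈ PySem.Chars.join sep parts := by
  induction parts with
  | nil => cases hseg
  | cons p rest ih =>
    cases rest with
    | nil =>
      rw [PySem.Chars.join_singleton]
      have : seg = p := by simpa using hseg
      exact this ▸ hc
    | cons q rest' =>
      rw [PySem.Chars.join_cons_cons]
      rcases List.mem_cons.mp hseg with h | h
      · exact List.mem_append.mpr (Or.inl (List.mem_append.mpr (Or.inl (h ▸ hc))))
      · exact List.mem_append.mpr (Or.inr (ih h))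

-- one non-space character through A's step
theorem stepA_nonspace (c : Char) (hc : c ≠ ' ') (n x : Int) (ns : List Char) (isx : Bool) :
    solAStep (n, x, ns, isx) c
      = (n, x, ns ++ (if pvInRange c then [c] else []), isx || (c == 'x')) := by
  by_cases hx : c = 'x'
  · subst hx
    simp [solAStep, pvInRange]
  · have : (c == 'x') = false := by simpa using hx
    simp [solAStep, hc, hx, this, pvInRange]
    split_ifs <;> simp_all

-- A's loop across one separator-free token (processed right to left)
theorem segFold (seg : List Char) (hs : ' ' ∉ seg) :
    ∀ (n x : Int) (ns : List Char) (isx : Bool),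
      seg.reverse.foldl solAStep (n, x, ns, isx)
        = (n, x, ns ++ (seg.filter pvInRange).reverse, isx || seg.contains 'x') := by
  induction seg with
  | nil => intro n x ns isx; simp
  | cons c rest ih =>
    intro n x ns isx
    have hc : c ≠ ' ' := fun he => hs (by simp [he])
    have hrest : ' ' ∉ rest := fun hm => hs (by simp [hm])
    rw [List.reverse_cons, List.foldl_append, ih hrest n x ns isx]
    simp only [List.foldl_cons, List.foldl_nil]
    rw [stepA_nonspace c hc]
    simp only [List.filter_cons, List.contains_cons]
    have hb : ('x' == c || rest.contains 'x') = (rest.contains 'x' || (c == 'x')) := by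
      by_cases hx : c = 'x'
      · subst hx; simp
      · have h1 : (c == 'x') = false := by simpa using hx
        have h2 : ('x' == c) = false := by simpa using (Ne.symm hx)
        simp [h1, h2]
    rw [hb, ← Bool.or_assoc]
    have hl : (if pvInRange c = true then c :: List.filter pvInRange rest
          else List.filter pvInRange rest).reverse
        = (List.filter pvInRange rest).reverse ++ (if pvInRange c = true then [c] else []) := by
      split_ifs <;> simp
    rw [hl, ← List.append_assoc]

-- the collected characters of a good token are exactly its digits
theorem filter_eq_of_good (seg : List Char) (h : ∀ c ∈ seg.filter pvInRange, pvIsDig c = true) :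
    seg.filter pvInRange = seg.filter pvIsDig := by
  apply List.filter_congr
  intro c hcm
  by_cases hr : pvInRange c = true
  · rw [hr, h c (List.mem_filter.mpr ⟨hcm, hr⟩)]
  · have hr' : pvInRange c = false := by simpa using hr
    have hd : pvIsDig c = false := by
      by_contra hdd
      have : pvIsDig c = true := by simpa using hdd
      simp [pvIsDig] at this
      simp [pvInRange] at hr'
      omega
    rw [hr', hd]

-- flushing a good token's end state on a space
theorem flushSeg (seg : List Char) (h : GoodSeg seg) (n x : Int) :
    solAStep (n, x, (seg.filter pvInRange).reverse, seg.contains 'x') ' '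
      = (n + nval seg, x + xval seg, [], false) := by
  obtain ⟨-, h2⟩ := h
  rw [filter_eq_of_good seg h2]
  by_cases hm : 'x' ∈ seg
  · simp [solAStep, nval, xval, hm]
  · have hcx : seg.contains 'x' = false := by simpa using hm
    simp [solAStep, nval, xval, hm]

-- A's whole loop over a split-joined list of good tokens
theorem loopA (ts : List (List Char)) :
    ∀ (seg : List Char), GoodSeg seg → (∀ u ∈ ts, GoodSeg u) → ∀ (n x : Int),
      ((PySem.Chars.join [' '] (seg :: ts)).reverse).foldl solAStep (n, x, [], false)
        = (n + (ts.map nval).sum, x + (ts.map xval).sum,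
           (seg.filter pvInRange).reverse, seg.contains 'x') := by
  induction ts with
  | nil =>
    intro seg hseg _ n x
    rw [PySem.Chars.join_singleton, segFold seg hseg.1 n x [] false]
    simp
  | cons t' ts ih =>
    intro seg hseg hts n x
    rw [PySem.Chars.join_cons_cons]
    have hrev : (seg ++ [' '] ++ PySem.Chars.join [' '] (t' :: ts)).reverse
        = (PySem.Chars.join [' '] (t' :: ts)).reverse ++ ([' '] ++ seg.reverse) := by
      simp
    rw [hrev, List.foldl_append, List.foldl_append]
    rw [ih t' (hts t' (by simp)) (fun u hu => hts u (by simp [hu])) n x]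
    simp only [List.foldl_cons, List.foldl_nil]
    rw [flushSeg t' (hts t' (by simp))]
    rw [segFold seg hseg.1]
    simp only [List.map_cons, List.sum_cons, Prod.mk.injEq, List.nil_append, Bool.false_or]
    refine ⟨by ring, by ring, trivial⟩

-- B's fold accumulates the same per-token values
theorem foldB (ts : List (List Char)) :
    ∀ (x n : Int), ts.foldl solBSeg (x, n) = (x + (ts.map xval).sum, n + (ts.map nval).sum) := by
  induction ts with
  | nil => intro x n; simp
  | cons t ts ih =>
    intro x n
    have hstep : solBSeg (x, n) t = (x + xval t, n + nval t) := by
      simp only [solBSeg, xval, nval]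
      split_ifs <;> simp_all
    rw [List.foldl_cons, hstep, ih]
    simp [add_assoc]

-- the final flush after A's loop, evaluated on the loop's final state
theorem finalFlushA (seg : List Char) (h : GoodSeg seg) (N X : Int) :
    (if seg.contains 'x' then
      (N, X + (if (seg.filter pvInRange).reverse ≠ [] then
        (PySem.Int.ofChars? (seg.filter pvInRange).reverse.reverse).getD 0 else 1))
    else if (seg.filter pvInRange).reverse ≠ [] then
      (N + (PySem.Int.ofChars? (seg.filter pvInRange).reverse.reverse).getD 0, X)
    else (N, X))
      = (N + nval seg, X + xval seg) := by
  obtain ⟨-, h2⟩ := h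
  rw [filter_eq_of_good seg h2]
  by_cases hm : 'x' ∈ seg
  · simp [nval, xval, hm]
  · have hcx : seg.contains 'x' = false := by simpa using hm
    simp [nval, xval, hm]
    split_ifs <;> simp

-- ===== VERDICT (by name: the statement is the Claim_ definition above) =====
theorem solution_spec : Claim_equal_solution := by
  intro poly _ hpre
  unfold Spec_solution
  obtain ⟨t, ts, hts⟩ :=
    List.exists_cons_of_ne_nil (splitOn_ne_nil [' '] poly.toList)
  have hjoin := join_splitOn [' '] (by simp) poly.toList
  have hgood : ∀ u ∈ PySem.Chars.splitOn poly.toList [' '], GoodSeg u := by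
    intro u hu
    refine ⟨splitOn_no_sep poly.toList u hu, ?_⟩
    intro c hcf
    obtain ⟨hcm, hcr⟩ := List.mem_filter.mp hcf
    have hpre' : ∀ c ∈ poly.toList, pvInRange c = true → pvIsDig c = true := by
      intro d hd hr
      have := (List.all_eq_true.mp hpre) d hd
      simpa [hr] using this
    exact hpre' c (hjoin ▸ mem_join_of_mem [' '] _ u hu c hcm) hcr
  have hA : poly.toList.reverse.foldl solAStep (0, 0, ([] : List Char), false)
      = ((ts.map nval).sum, (ts.map xval).sum, (t.filter pvInRange).reverse, t.contains 'x') := by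
    conv_lhs => rw [← hjoin, hts]
    rw [loopA ts t (hgood t (by rw [hts]; exact List.mem_cons_self ..))
      (fun u hu => hgood u (by rw [hts]; exact List.mem_cons_of_mem _ hu)) 0 0]
    simp
  have hB : (PySem.Chars.splitOn poly.toList [' ']).foldl solBSeg (0, 0)
      = (((t :: ts).map xval).sum, ((t :: ts).map nval).sum) := by
    rw [hts, foldB (t :: ts) 0 0]
    simp
  rw [solution, solution_alt, hA, hB]
  simp only
  rw [finalFlushA t (hgood t (by rw [hts]; exact List.mem_cons_self ..))]
  simp only [List.map_cons, List.sum_cons]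
  have e1 : (ts.map nval).sum + nval t = nval t + (ts.map nval).sum := by ring
  have e2 : (ts.map xval).sum + xval t = xval t + (ts.map xval).sum := by ring
  rw [e1, e2]
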